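-- pv_equiv track=rewrite | github.com/jn12-29/DeepResearch | analysis/export_summary_md.py | smart_dedup
-- ===== SOURCE A (Python) =====
-- def smart_dedup(data_headers: list[str], raw_rows: list[tuple]) -> tuple[list[str], list[list]]:
--     """
--     raw_rows: [(model, dataset, run, val, val, ...)]
--
--     Per (model, dataset) group:
--     - If all runs share identical data values → collapse to one row, run=None
--     - If any run differs → keep all rows with their run index
--
--     Returns (final_headers, final_rows).
--     Run column is included only when at least one row has a run value.
--     """
--     from collections import defaultdict
--     groups: dict[tuple, list] = defaultdict(list)
--     for row in raw_rows:
--         key = (row[0], row[1])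
--         groups[key].append(row)
--
--     final_rows = []
--     for key in sorted(groups):
--         group = groups[key]
--         vals = [r[3:] for r in group]
--         if len(set(vals)) == 1:
--             # All identical — emit single row, run=None
--             model, dataset = key
--             final_rows.append([model, dataset, None] + list(vals[0]))
--         else:
--             for r in group:
--                 final_rows.append(list(r))
--
--     need_run = any(r[2] is not None for r in final_rows)
--     if need_run:
--         headers = ["Model", "Dataset", "Run"] + data_headers
--         out_rows = [
--             [r[0], r[1], r[2] if r[2] is not None else "—"] + r[3:]
--             for r in final_rows
--         ]
--     else:
--         headers = ["Model", "Dataset"] + data_headers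
--         out_rows = [[r[0], r[1]] + r[3:] for r in final_rows]
--
--     return headers, out_rows
-- ===== SOURCE B (Python) =====
-- def smart_dedup(data_headers: list[str], raw_rows: list[tuple]) -> tuple[list[str], list[list]]:
--     """Two-phase rewrite: the sorted distinct keys are gathered first and each
--     group re-collected by a filter scan over raw_rows (no dict-of-lists); the
--     Run-column question is settled up front, so output rows are emitted directly
--     in their final shape with no None-sentinel intermediate or substitution pass."""
--     keys = sorted({(r[0], r[1]) for r in raw_rows})
--     groups = [[r for r in raw_rows if (r[0], r[1]) == k] for k in keys]
--     varies = lambda g: any(tuple(r[3:]) != tuple(g[0][3:]) for r in g)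
--     if any(varies(g) for g in groups):
--         rows = []
--         for k, g in zip(keys, groups):
--             if varies(g):
--                 rows.extend([r[0], r[1], r[2], *r[3:]] for r in g)
--             else:
--                 rows.append([k[0], k[1], "—", *g[0][3:]])
--         return ["Model", "Dataset", "Run"] + data_headers, rows
--     return (["Model", "Dataset"] + data_headers,
--             [[k[0], k[1], *g[0][3:]] for k, g in zip(keys, groups)])
-- ===== Notes on version B (the rewrite author's own statement) =====
-- stated objective: alternative
-- what changed: Drops the defaultdict and the None-sentinel intermediate final_rows: B sorts the distinct (model,dataset) keys, re-collects each group by a filter scan over the raw rows, decides the Run column up front, and emits every output row directly in its final shape, with no placeholder-substitution second pass.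
import Mathlib
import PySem

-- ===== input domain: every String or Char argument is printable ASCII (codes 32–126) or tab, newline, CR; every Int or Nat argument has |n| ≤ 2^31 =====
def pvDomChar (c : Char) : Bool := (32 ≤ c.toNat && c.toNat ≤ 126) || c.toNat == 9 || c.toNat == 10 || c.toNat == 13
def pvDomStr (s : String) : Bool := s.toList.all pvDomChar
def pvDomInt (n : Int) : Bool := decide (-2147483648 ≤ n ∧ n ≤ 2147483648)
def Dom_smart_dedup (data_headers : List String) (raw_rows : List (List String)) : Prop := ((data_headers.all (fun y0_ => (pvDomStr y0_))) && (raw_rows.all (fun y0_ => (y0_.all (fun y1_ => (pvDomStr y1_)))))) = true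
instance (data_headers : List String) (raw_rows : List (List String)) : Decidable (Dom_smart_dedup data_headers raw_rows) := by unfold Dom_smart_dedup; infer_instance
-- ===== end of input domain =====

-- B drops A's defaultdict grouping and None-sentinel intermediate rows: it sorts the distinct
-- keys, re-collects each group by filtering, decides the Run column up front and emits output
-- rows directly in final shape (objective: alternative).


-- key = (row[0], row[1]) — the same lambda occurs in both Pythons
def pvKeyOf (r : List String) : String × String :=
  (PySem.List.pyGetD r 0 "", PySem.List.pyGetD r 1 "")

-- ===== PORT A =====
-- A's final rows are (model, dataset, run?, data-values); Python's ragged list rows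
-- [model, dataset, run/None] + vals are rendered as this 4-tuple
def pvAProcess (k : String × String) (group : List (List String)) :
    List (String × String × Option String × List String) :=
  let vals := group.map (fun r => r.drop 3)
  if PySem.Set.len (PySem.Set.ofList vals) == 1 then
    [(k.1, k.2, none, vals.headD [])]
  else
    group.map (fun r => (PySem.List.pyGetD r 0 "", PySem.List.pyGetD r 1 "",
      some (PySem.List.pyGetD r 2 ""), r.drop 3))

def smart_dedup (data_headers : List String) (raw_rows : List (List String)) :
    List String × List (List String) :=
  let groups : PySem.Dict (String × String) (List (List String)) :=
    raw_rows.foldl (fun g row => g.modify (pvKeyOf row) [] (fun v => v ++ [row])) PySem.Dict.empty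
  let final_rows :=
    (PySem.List.sorted2 groups.keys (fun k => k.1) (fun k => k.2)).foldl
      (fun acc key => acc ++ pvAProcess key (groups.getD key [])) []
  let need_run := final_rows.any (fun fr => fr.2.2.1.isSome)
  if need_run then
    (["Model", "Dataset", "Run"] ++ data_headers,
     final_rows.map (fun fr => [fr.1, fr.2.1, fr.2.2.1.getD "—"] ++ fr.2.2.2))
  else
    (["Model", "Dataset"] ++ data_headers,
     final_rows.map (fun fr => [fr.1, fr.2.1] ++ fr.2.2.2))

-- ===== PORT B =====
-- 'varies(g)': any(tuple(r[3:]) != tuple(g[0][3:]) for r in g); g[0] rendered with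
-- default [] (every built group is nonempty, so this is exact)
def pvVaries (g : List (List String)) : Bool :=
  g.any (fun r => !(r.drop 3 == (PySem.List.pyGetD g 0 []).drop 3))

def smart_dedup_alt (data_headers : List String) (raw_rows : List (List String)) :
    List String × List (List String) :=
  let keys := PySem.List.sorted2 (PySem.Set.ofList (raw_rows.map pvKeyOf))
      (fun k => k.1) (fun k => k.2)
  let groups := keys.map (fun k => raw_rows.filter (fun r => pvKeyOf r == k))
  if groups.any pvVaries then
    (["Model", "Dataset", "Run"] ++ data_headers,
     (keys.zip groups).foldl (fun rows kg =>
        if pvVaries kg.2 then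
          rows ++ kg.2.map (fun r =>
            [PySem.List.pyGetD r 0 "", PySem.List.pyGetD r 1 "",
             PySem.List.pyGetD r 2 ""] ++ r.drop 3)
        else
          rows ++ [[kg.1.1, kg.1.2, "—"] ++ (PySem.List.pyGetD kg.2 0 []).drop 3]) [])
  else
    (["Model", "Dataset"] ++ data_headers,
     (keys.zip groups).map (fun kg => [kg.1.1, kg.1.2] ++ (PySem.List.pyGetD kg.2 0 []).drop 3))

-- ===== PRECONDITION & SPEC =====
-- Pre_ excludes exactly the inputs on which A raises IndexError: a row with fewer than
-- 2 fields, or a 2-field row whose (model,dataset) group does not collapse (some row of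
-- the same group carries data values), which makes A evaluate r[2] on the 2-field row.
def Pre_smart_dedup (data_headers : List String) (raw_rows : List (List String)) : Prop :=
  (∀ r ∈ raw_rows, 2 ≤ r.length) ∧
  (∀ r ∈ raw_rows, r.length = 2 →
    ∀ r' ∈ raw_rows, r'.take 2 = r.take 2 → r'.length ≤ 3)
instance (data_headers : List String) (raw_rows : List (List String)) : Decidable (Pre_smart_dedup data_headers raw_rows) := by unfold Pre_smart_dedup; infer_instance

def pvWitness_smart_dedup : List String × List (List String) :=
  (["score"], [["m", "d", "0", "x"], ["m", "d", "1", "y"]])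

def Spec_smart_dedup (data_headers : List String) (raw_rows : List (List String)) (out : List String × List (List String)) : Prop := out = smart_dedup_alt data_headers raw_rows
instance (data_headers : List String) (raw_rows : List (List String)) (out : List String × List (List String)) : Decidable (Spec_smart_dedup data_headers raw_rows out) := by unfold Spec_smart_dedup; infer_instance

-- ===== CLAIM (what is proved, stated in full; the proofs are below) =====
def Claim_equal_smart_dedup : Prop := ∀ (data_headers : List String) (raw_rows : List (List String)), Dom_smart_dedup data_headers raw_rows → Pre_smart_dedup data_headers raw_rows → Spec_smart_dedup data_headers raw_rows (smart_dedup data_headers raw_rows)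

-- ===== LEMMAS AND PROOFS =====

theorem pvNodupSingleton {α : Type} (L : List α) (a : α) (hn : L.Nodup)
    (hm : ∀ x, x ∈ L ↔ x = a) : L = [a] := by
  cases L with
  | nil => exact absurd ((hm a).mpr rfl) (by simp)
  | cons b t =>
    have hb : b = a := (hm b).mp (by simp)
    subst hb
    cases t with
    | nil => rfl
    | cons c t' =>
      have hc : c = b := (hm c).mp (by simp)
      subst hc
      simp at hn

theorem pvSetLenOne (vals : List (List String)) (h : vals ≠ []) :
    (PySem.Set.len (PySem.Set.ofList vals) == 1) = vals.all (fun v => v == vals.headD []) := by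
  obtain ⟨v, rest, rfl⟩ := List.exists_cons_of_ne_nil h
  rw [PySem.Set.len_eq]
  simp only [List.headD_cons, List.all_eq_true, beq_iff_eq]
  by_cases hall : ∀ x ∈ v :: rest, x = v
  · have : PySem.Set.ofList (v :: rest) = [v] := by
      refine pvNodupSingleton _ v (PySem.Set.nodup_ofList _) (fun x => ?_)
      rw [PySem.Set.mem_ofList]
      constructor
      · exact hall x
      · rintro rfl; simp
    rw [this]
    rw [show ((↑(List.length [v]) : Int) == 1) = true from by simp]
    symm
    simp only [List.all_eq_true, beq_iff_eq]
    exact hall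
  · have h2 : ¬ (List.length (PySem.Set.ofList (v :: rest)) = 1) := by
      intro hlen
      obtain ⟨a, ha⟩ := List.length_eq_one_iff.mp hlen
      refine hall (fun x hx => ?_)
      have hxa : x = a := by
        have := (PySem.Set.mem_ofList (v :: rest) x).mpr hx
        simpa [ha] using this
      have hva : v = a := by
        have := (PySem.Set.mem_ofList (v :: rest) v).mpr (by simp)
        simpa [ha] using this
      rw [hxa, hva]
    rw [show ((List.length (PySem.Set.ofList (v :: rest)) : Int) == 1) = false from by
      simpa using (fun hc => h2 (by exact_mod_cast hc))]
    symm
    rw [List.all_eq_false]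
    push_neg at hall
    obtain ⟨x, hx, hne⟩ := hall
    exact ⟨x, hx, by simpa using hne⟩

theorem pvGetD_zero_cons (r : List String) (t : List (List String)) :
    PySem.List.pyGetD (r :: t) 0 [] = r := by
  simp [PySem.List.pyGetD, PySem.List.pyGet?, PySem.List.pyIdx?]

-- A's collapse test equals the negation of B's 'varies', on nonempty groups
theorem pvCollapse_eq (g : List (List String)) (h : g ≠ []) :
    (PySem.Set.len (PySem.Set.ofList (g.map (fun r => r.drop 3))) == 1) = !pvVaries g := by
  obtain ⟨r, t, rfl⟩ := List.exists_cons_of_ne_nil h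
  rw [pvSetLenOne _ (by simp)]
  rw [Bool.eq_iff_iff]
  simp [pvVaries, pvGetD_zero_cons, List.any_eq_false]

theorem pvAProcess_shape (k : String × String) (g : List (List String)) (h : g ≠ []) :
    pvAProcess k g =
      if pvVaries g then
        g.map (fun r => (PySem.List.pyGetD r 0 "", PySem.List.pyGetD r 1 "",
          some (PySem.List.pyGetD r 2 ""), r.drop 3))
      else [(k.1, k.2, none, (PySem.List.pyGetD g 0 []).drop 3)] := by
  obtain ⟨r, t, rfl⟩ := List.exists_cons_of_ne_nil h
  simp only [pvAProcess, pvCollapse_eq _ (List.cons_ne_nil r t)]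
  cases hv : pvVaries (r :: t) <;> simp [pvGetD_zero_cons]

theorem pvZipSelf {α β : Type} (xs : List α) (f : α → β) :
    xs.zip (xs.map f) = xs.map (fun x => (x, f x)) := by
  induction xs with
  | nil => rfl
  | cons x t ih => simp [List.zip_cons_cons, ih]

theorem pvAnyFlatMap {α β : Type} (xs : List α) (f : α → List β) (p : β → Bool) :
    (xs.flatMap f).any p = xs.any (fun x => (f x).any p) := by
  induction xs with
  | nil => rfl
  | cons x t ih => simp [List.flatMap_cons, List.any_append, ih]

theorem pvFlatMapCongr {α β : Type} (K : List α) (f g : α → List β)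
    (h : ∀ k ∈ K, f k = g k) : K.flatMap f = K.flatMap g := by
  induction K with
  | nil => rfl
  | cons k K ih => simp only [List.flatMap_cons, h k (by simp), ih (fun z hz => h z (by simp [hz]))]

theorem pvAnyCongr {α : Type} (xs : List α) (p q : α → Bool)
    (h : ∀ x ∈ xs, p x = q x) : xs.any p = xs.any q := by
  induction xs with
  | nil => rfl
  | cons x t ih => simp only [List.any_cons, h x (by simp), ih (fun z hz => h z (by simp [hz]))]

theorem pvFlatMapSingleton {α β : Type} (xs : List α) (h : α → β) :
    xs.flatMap (fun x => [h x]) = xs.map h := by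
  induction xs with
  | nil => rfl
  | cons x t ih => simp [List.flatMap_cons, ih]

-- the heart of the proof: both programs compute the same (headers, rows) pair
theorem pvMain (data_headers : List String) (raw_rows : List (List String)) :
    smart_dedup data_headers raw_rows = smart_dedup_alt data_headers raw_rows := by
  simp only [smart_dedup, smart_dedup_alt]
  set f : String × String → List (List String) :=
    fun k => raw_rows.filter (fun r => pvKeyOf r == k) with hf
  set G := raw_rows.foldl (fun g row => g.modify (pvKeyOf row) [] (fun v => v ++ [row]))
    (PySem.Dict.empty (κ := String × String) (ν := List (List String))) with hG
  have hkeys : G.keys = PySem.Set.ofList (raw_rows.map pvKeyOf) := by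
    rw [hG, PySem.Dict.keys_foldl_modify_key raw_rows pvKeyOf [] (fun _ row => fun v => v ++ [row])
      PySem.Dict.empty, PySem.Dict.keys_empty, PySem.Set.update_nil_left]
  have hgetD : ∀ c, G.getD c [] = f c := by
    intro c
    rw [hG, show (raw_rows.foldl (fun g row => g.modify (pvKeyOf row) [] (fun v => v ++ [row]))
        (PySem.Dict.empty (κ := String × String) (ν := List (List String)))) =
      List.foldl (fun d p => d.modify p.1 [] (fun x => x ++ [p.2])) PySem.Dict.empty
        (raw_rows.map (fun r => (pvKeyOf r, r))) from by rw [List.foldl_map]]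
    rw [PySem.Dict.getD_foldl_modify_append]
    simp [hf, List.filter_map, Function.comp_def]
  set SK := PySem.List.sorted2 (PySem.Set.ofList (raw_rows.map pvKeyOf))
    (fun k => k.1) (fun k => k.2) with hSK
  have hne : ∀ k ∈ SK, f k ≠ [] := by
    intro k hk
    have hmem : k ∈ raw_rows.map pvKeyOf := by
      have := (PySem.List.sorted2_perm (PySem.Set.ofList (raw_rows.map pvKeyOf))
        (fun k => k.1) (fun k => k.2) false).mem_iff.mp (hSK ▸ hk)
      exact (PySem.Set.mem_ofList _ _).mp this
    obtain ⟨r, hr, rfl⟩ := List.mem_map.mp hmem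
    exact List.ne_nil_of_mem (List.mem_filter.mpr ⟨hr, by simp⟩)
  -- A's final_rows as a flatMap over the sorted keys, with B's per-key shape
  have hfinal :
      (PySem.List.sorted2 G.keys (fun k => k.1) (fun k => k.2)).foldl
        (fun acc key => acc ++ pvAProcess key (G.getD key [])) [] =
      SK.flatMap (fun k =>
        if pvVaries (f k) then
          (f k).map (fun r => (PySem.List.pyGetD r 0 "", PySem.List.pyGetD r 1 "",
            some (PySem.List.pyGetD r 2 ""), r.drop 3))
        else [(k.1, k.2, none, (PySem.List.pyGetD (f k) 0 []).drop 3)]) := by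
    rw [hkeys, ← hSK, PySem.List.foldl_append_eq_flatMap, List.nil_append]
    refine pvFlatMapCongr SK _ _ (fun k hk => ?_)
    rw [hgetD k, pvAProcess_shape k (f k) (hne k hk)]
  rw [hfinal, pvZipSelf SK f]
  -- need_run on the A side equals B's any-varies test
  have hneed :
      (SK.flatMap (fun k =>
        if pvVaries (f k) then
          (f k).map (fun r => (PySem.List.pyGetD r 0 "", PySem.List.pyGetD r 1 "",
            some (PySem.List.pyGetD r 2 ""), r.drop 3))
        else [(k.1, k.2, none, (PySem.List.pyGetD (f k) 0 []).drop 3)])).any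
          (fun fr => fr.2.2.1.isSome) =
      (SK.map f).any pvVaries := by
    rw [pvAnyFlatMap, List.any_map]
    refine pvAnyCongr SK _ _ (fun k hk => ?_)
    cases hv : pvVaries (f k)
    · simp [hv]
    · obtain ⟨r, t, hrt⟩ := List.exists_cons_of_ne_nil (hne k hk)
      simp only [hv, if_true]
      rw [hrt]
      simp only [List.map_cons, List.any_cons, Option.isSome_some, Bool.true_or]
      exact (hv.symm : true = pvVaries (f k))
  rw [hneed]
  cases hnr : (SK.map f).any pvVaries
  · -- no Run column: every group collapses
    simp only [Bool.false_eq_true, if_false]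
    have hall : ∀ k ∈ SK, pvVaries (f k) = false := fun k hk =>
      Bool.not_eq_true _ ▸ (List.any_eq_false).mp hnr (f k) (List.mem_map_of_mem hk)
    refine congrArg _ ?_
    rw [pvFlatMapCongr SK _ (fun k => [((k.1 : String), (k.2 : String), (none : Option String),
        (PySem.List.pyGetD (f k) 0 []).drop 3)]) (fun k hk => by rw [hall k hk]; simp),
      pvFlatMapSingleton, List.map_map, List.map_map]
    rfl
  · -- Run column present
    simp only [if_true]
    refine congrArg _ ?_
    rw [List.map_flatMap, List.foldl_map]
    rw [show (fun (rows : List (List String)) (k : String × String) =>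
        if pvVaries ((k, f k).2) then
          rows ++ (k, f k).2.map (fun r =>
            [PySem.List.pyGetD r 0 "", PySem.List.pyGetD r 1 "",
             PySem.List.pyGetD r 2 ""] ++ r.drop 3)
        else
          rows ++ [[(k, f k).1.1, (k, f k).1.2, "—"] ++ (PySem.List.pyGetD (k, f k).2 0 []).drop 3]) =
      (fun rows k => rows ++ (if pvVaries (f k) then
          (f k).map (fun r =>
            [PySem.List.pyGetD r 0 "", PySem.List.pyGetD r 1 "",
             PySem.List.pyGetD r 2 ""] ++ r.drop 3)
        else [[k.1, k.2, "—"] ++ (PySem.List.pyGetD (f k) 0 []).drop 3])) from by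
      funext rows k; split <;> rfl]
    rw [PySem.List.foldl_append_eq_flatMap, List.nil_append]
    refine pvFlatMapCongr SK _ _ (fun k hk => ?_)
    cases hv : pvVaries (f k) <;> simp [hv]

-- ===== VERDICT (by name: the statement is the Claim_ definition above) =====
theorem smart_dedup_spec : Claim_equal_smart_dedup := by
  intro data_headers raw_rows _ _
  exact pvMain data_headers raw_rows
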